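-- pv_equiv track=rewrite | github.com/hamdyaea/GNU-Coreutils-Python | comm.py | compare_files
-- ===== SOURCE A (Python) =====
-- def compare_files(file1_lines, file2_lines, suppress_columns, delimiter, zero_terminated):
--     """Compare deux listes de lignes et affiche les résultats."""
--     delimiter = delimiter if delimiter else ("\0" if zero_terminated else "\t")
--     output = []
--
--     file1_only = sorted(set(file1_lines) - set(file2_lines))
--     file2_only = sorted(set(file2_lines) - set(file1_lines))
--     common = sorted(set(file1_lines) & set(file2_lines))
--
--     if 1 not in suppress_columns:
--         output.extend([f"{line}{delimiter}" for line in file1_only])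
--     if 2 not in suppress_columns:
--         output.extend([f"{delimiter}{line}" for line in file2_only])
--     if 3 not in suppress_columns:
--         output.extend([f"{delimiter}{delimiter}{line}" for line in common])
--
--     return "".join(output)
-- ===== SOURCE B (Python) =====
-- def compare_files(file1_lines, file2_lines, suppress_columns, delimiter, zero_terminated):
--     """One indexing pass builds a line -> 2-bit membership flag dict; one sorted
--     pass classifies every distinct line into its column bucket."""
--     delimiter = delimiter if delimiter else ("\0" if zero_terminated else "\t")
--     flags = {}
--     for line in file1_lines:
--         flags[line] = flags.get(line, 0) | 1
--     for line in file2_lines: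
--         flags[line] = flags.get(line, 0) | 2
--     only1, only2, common = [], [], []
--     for line in sorted(flags):
--         f = flags[line]
--         if f == 1:
--             only1.append(line)
--         elif f == 2:
--             only2.append(line)
--         else:
--             common.append(line)
--     output = []
--     if 1 not in suppress_columns:
--         output.extend(line + delimiter for line in only1)
--     if 2 not in suppress_columns:
--         output.extend(delimiter + line for line in only2)
--     if 3 not in suppress_columns:
--         output.extend(delimiter + delimiter + line for line in common)
--     return "".join(output)
-- ===== Notes on version B (the rewrite author's own statement) =====
-- stated objective: alternative
-- what changed: Replaces three set-difference/intersection-then-sort operations by one pass building a dict of 2-bit membership flags and a single sorted pass classifying each distinct line into its column bucket.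
import Mathlib
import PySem

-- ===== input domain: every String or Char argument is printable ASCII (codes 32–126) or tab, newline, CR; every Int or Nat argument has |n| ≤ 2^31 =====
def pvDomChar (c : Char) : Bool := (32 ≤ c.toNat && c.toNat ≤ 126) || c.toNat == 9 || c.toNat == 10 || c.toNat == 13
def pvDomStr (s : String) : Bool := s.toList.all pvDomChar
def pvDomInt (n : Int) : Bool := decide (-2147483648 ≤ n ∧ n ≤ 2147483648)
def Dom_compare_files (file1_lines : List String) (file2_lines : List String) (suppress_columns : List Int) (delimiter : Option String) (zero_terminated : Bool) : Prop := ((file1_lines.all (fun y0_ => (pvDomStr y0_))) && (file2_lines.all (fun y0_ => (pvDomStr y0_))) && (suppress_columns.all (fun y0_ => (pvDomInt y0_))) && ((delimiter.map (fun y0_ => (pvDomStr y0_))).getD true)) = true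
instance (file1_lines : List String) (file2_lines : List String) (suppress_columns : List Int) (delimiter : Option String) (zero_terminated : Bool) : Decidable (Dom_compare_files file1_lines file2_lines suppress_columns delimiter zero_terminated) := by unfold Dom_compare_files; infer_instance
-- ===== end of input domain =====

-- B replaces A's three set-difference/intersection-then-sort steps by one dict of 2-bit
-- membership flags plus a single classifying pass over the sorted distinct lines (alternative
-- decomposition, same result).

-- ===== PORT A =====
def compare_files (file1_lines : List String) (file2_lines : List String) (suppress_columns : List Int) (delimiter : Option String) (zero_terminated : Bool) : String :=
  -- delimiter = delimiter if delimiter else ("\0" if zero_terminated else "\t")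
  let d : String := match delimiter with
    | some s => if s = "" then (if zero_terminated then "\x00" else "\t") else s
    | none => if zero_terminated then "\x00" else "\t"
  let file1_only := PySem.List.sorted ((PySem.Set.ofList file1_lines).diff (PySem.Set.ofList file2_lines)) (fun x => x)
  let file2_only := PySem.List.sorted ((PySem.Set.ofList file2_lines).diff (PySem.Set.ofList file1_lines)) (fun x => x)
  let common := PySem.List.sorted ((PySem.Set.ofList file1_lines).inter (PySem.Set.ofList file2_lines)) (fun x => x)
  let output : List String := []
  let output := if suppress_columns.contains 1 then output else output ++ file1_only.map (fun line => line ++ d)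
  let output := if suppress_columns.contains 2 then output else output ++ file2_only.map (fun line => d ++ line)
  let output := if suppress_columns.contains 3 then output else output ++ common.map (fun line => d ++ d ++ line)
  String.join output

-- ===== PORT B =====
def compare_files_alt (file1_lines : List String) (file2_lines : List String) (suppress_columns : List Int) (delimiter : Option String) (zero_terminated : Bool) : String :=
  let d : String := match delimiter with
    | some s => if s = "" then (if zero_terminated then "\x00" else "\t") else s
    | none => if zero_terminated then "\x00" else "\t"
  -- flags[line] = flags.get(line, 0) | 1  /  | 2   (Python '|' on ints = Int.lor)
  let flags := file1_lines.foldl (fun fl line => fl.modify line 0 (fun v => Int.lor v 1)) PySem.Dict.empty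
  let flags := file2_lines.foldl (fun fl line => fl.modify line 0 (fun v => Int.lor v 2)) flags
  let buckets := (PySem.List.sorted flags.keys (fun x => x)).foldl
    (fun acc line =>
      let f := flags.getD line 0
      if f = 1 then (acc.1 ++ [line], acc.2.1, acc.2.2)
      else if f = 2 then (acc.1, acc.2.1 ++ [line], acc.2.2)
      else (acc.1, acc.2.1, acc.2.2 ++ [line]))
    (([] : List String), ([] : List String), ([] : List String))
  let output : List String := if suppress_columns.contains 1 then [] else buckets.1.map (fun line => line ++ d)
  let output := if suppress_columns.contains 2 then output else output ++ buckets.2.1.map (fun line => d ++ line)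
  let output := if suppress_columns.contains 3 then output else output ++ buckets.2.2.map (fun line => d ++ d ++ line)
  String.join output

-- ===== PRECONDITION & SPEC =====
def Spec_compare_files (file1_lines : List String) (file2_lines : List String) (suppress_columns : List Int) (delimiter : Option String) (zero_terminated : Bool) (out : String) : Prop := out = compare_files_alt file1_lines file2_lines suppress_columns delimiter zero_terminated
instance (file1_lines : List String) (file2_lines : List String) (suppress_columns : List Int) (delimiter : Option String) (zero_terminated : Bool) (out : String) : Decidable (Spec_compare_files file1_lines file2_lines suppress_columns delimiter zero_terminated out) := by unfold Spec_compare_files; infer_instance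

-- ===== CLAIM (what is proved, stated in full; the proofs are below) =====
def Claim_equal_compare_files : Prop := ∀ (file1_lines : List String) (file2_lines : List String) (suppress_columns : List Int) (delimiter : Option String) (zero_terminated : Bool), Dom_compare_files file1_lines file2_lines suppress_columns delimiter zero_terminated → Spec_compare_files file1_lines file2_lines suppress_columns delimiter zero_terminated (compare_files file1_lines file2_lines suppress_columns delimiter zero_terminated)

-- ===== LEMMAS AND PROOFS =====

-- Python's int '|' is idempotent in its second argument
lemma lor_lor_self (v c : Int) : Int.lor (Int.lor v c) c = Int.lor v c := by
  cases v <;> cases c <;>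
    simp only [Int.lor] <;> congr 1 <;>
    apply Nat.eq_of_testBit_eq <;> intro i <;>
    simp only [Nat.testBit_lor, Nat.testBit_ldiff, Nat.testBit_and] <;>
    cases h1 : Nat.testBit _ i <;> simp_all

-- value stored at x after a 'flags[line] = flags.get(line, 0) | c' loop
lemma getD_or_fold (c : Int) (l : List String) (d : PySem.Dict String Int) (x : String) :
    (l.foldl (fun fl line => fl.modify line 0 (fun v => Int.lor v c)) d).getD x 0
      = if x ∈ l then Int.lor (d.getD x 0) c else d.getD x 0 := by
  induction l generalizing d with
  | nil => simp
  | cons y t ih =>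
    simp only [List.foldl_cons, ih, PySem.Dict.getD_modify, List.mem_cons]
    by_cases hxy : x = y <;> by_cases hxt : x ∈ t <;>
      simp [hxy, hxt, lor_lor_self]

-- the flag each distinct line ends up with
def flagVal (file1_lines file2_lines : List String) (x : String) : Int :=
  if x ∈ file1_lines then (if x ∈ file2_lines then 3 else 1)
  else (if x ∈ file2_lines then 2 else 0)

lemma getD_flags (f1 f2 : List String) (x : String) :
    ((f2.foldl (fun fl line => fl.modify line 0 (fun v => Int.lor v 2))
        (f1.foldl (fun fl line => fl.modify line 0 (fun v => Int.lor v 1)) PySem.Dict.empty)).getD x 0)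
      = flagVal f1 f2 x := by
  rw [getD_or_fold, getD_or_fold]
  simp only [PySem.Dict.getD_empty, flagVal]
  split_ifs <;> rfl

-- the classifying loop is three filters
lemma classify_fold (f : String → Int) (ks : List String) (a b c : List String) :
    ks.foldl
      (fun acc line =>
        if f line = 1 then (acc.1 ++ [line], acc.2.1, acc.2.2)
        else if f line = 2 then (acc.1, acc.2.1 ++ [line], acc.2.2)
        else (acc.1, acc.2.1, acc.2.2 ++ [line])) (a, b, c)
      = (a ++ ks.filter (fun x => decide (f x = 1)),
         b ++ ks.filter (fun x => decide (f x = 2)),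
         c ++ ks.filter (fun x => !(decide (f x = 1)) && !(decide (f x = 2)))) := by
  induction ks generalizing a b c with
  | nil => simp
  | cons y t ih =>
    by_cases h1 : f y = 1
    · simp [h1, ih]
    · by_cases h2 : f y = 2 <;> simp [h1, h2, ih]

-- a filter of sorted(set(all)) is the sorted list of any nodup list with the right members
lemma sorted_filter_eq (all X : List String) (p : String → Bool)
    (hX : X.Nodup) (h : ∀ x, x ∈ X ↔ (x ∈ PySem.Set.ofList all ∧ p x = true)) :
    (PySem.List.sorted (PySem.Set.ofList all) (fun x => x)).filter p
      = PySem.List.sorted X (fun x => x) := by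
  symm
  apply PySem.List.sorted_eq_of_perm_of_pairwise_lt
  · have hs : (PySem.List.sorted (PySem.Set.ofList all) (fun x => x) false).Nodup :=
      (PySem.List.sorted_perm _ _ _).nodup_iff.mpr (PySem.Set.nodup_ofList all)
    rw [List.perm_ext_iff_of_nodup (hs.filter p) hX]
    intro x
    simp only [List.mem_filter, PySem.List.mem_sorted, h]
  · exact (PySem.List.sorted_ofList_pairwise_lt all).filter p

-- keys of the flag dict, sorted = sorted(set(file1+file2))
lemma sorted_keys_eq (f1 f2 : List String) :
    PySem.List.sorted
      ((f2.foldl (fun fl line => fl.modify line 0 (fun v => Int.lor v 2))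
        (f1.foldl (fun fl line => fl.modify line 0 (fun v => Int.lor v 1)) PySem.Dict.empty)).keys)
      (fun x => x)
    = PySem.List.sorted (PySem.Set.ofList (f1 ++ f2)) (fun x => x) := by
  rw [PySem.Dict.keys_foldl_modify f2 (0 : Int) (fun _ _ v => Int.lor v 2),
      PySem.Dict.keys_foldl_modify f1 (0 : Int) (fun _ _ v => Int.lor v 1)]
  apply (PySem.List.sorted_id_eq_sorted_id_iff_perm _ _).mpr
  apply (List.perm_ext_iff_of_nodup _ (PySem.Set.nodup_ofList _)).mpr
  · intro x
    simp [PySem.Set.mem_update, PySem.Set.mem_ofList, PySem.Dict.keys_empty]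
  · exact PySem.Set.nodup_update _ _ (PySem.Set.nodup_update _ _ (by simp [PySem.Dict.keys_empty]))

-- bucket memberships
lemma mem_bucket1 (f1 f2 : List String) (x : String) :
    x ∈ (PySem.Set.ofList f1).diff (PySem.Set.ofList f2)
      ↔ (x ∈ PySem.Set.ofList (f1 ++ f2) ∧ (decide (flagVal f1 f2 x = 1)) = true) := by
  simp only [PySem.Set.mem_diff, PySem.Set.mem_ofList, List.mem_append, flagVal]
  by_cases h1 : x ∈ f1 <;> by_cases h2 : x ∈ f2 <;> simp [h1, h2]

lemma mem_bucket2 (f1 f2 : List String) (x : String) :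
    x ∈ (PySem.Set.ofList f2).diff (PySem.Set.ofList f1)
      ↔ (x ∈ PySem.Set.ofList (f1 ++ f2) ∧ (decide (flagVal f1 f2 x = 2)) = true) := by
  simp only [PySem.Set.mem_diff, PySem.Set.mem_ofList, List.mem_append, flagVal]
  by_cases h1 : x ∈ f1 <;> by_cases h2 : x ∈ f2 <;> simp [h1, h2]

lemma mem_bucket3 (f1 f2 : List String) (x : String) :
    x ∈ (PySem.Set.ofList f1).inter (PySem.Set.ofList f2)
      ↔ (x ∈ PySem.Set.ofList (f1 ++ f2)
          ∧ (!(decide (flagVal f1 f2 x = 1)) && !(decide (flagVal f1 f2 x = 2))) = true) := by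
  simp only [PySem.Set.mem_inter, PySem.Set.mem_ofList, List.mem_append, flagVal]
  by_cases h1 : x ∈ f1 <;> by_cases h2 : x ∈ f2 <;> simp [h1, h2]

-- ===== VERDICT (by name: the statement is the Claim_ definition above) =====
theorem compare_files_spec : Claim_equal_compare_files := by
  intro f1 f2 sup delim zt _
  unfold Spec_compare_files compare_files compare_files_alt
  have hfun : (fun (acc : List String × List String × List String) line =>
        let f := ((f2.foldl (fun fl line => fl.modify line 0 (fun v => Int.lor v 2))
          (f1.foldl (fun fl line => fl.modify line 0 (fun v => Int.lor v 1)) PySem.Dict.empty)).getD line 0)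
        if f = 1 then (acc.1 ++ [line], acc.2.1, acc.2.2)
        else if f = 2 then (acc.1, acc.2.1 ++ [line], acc.2.2)
        else (acc.1, acc.2.1, acc.2.2 ++ [line]))
      = (fun (acc : List String × List String × List String) line =>
        if flagVal f1 f2 line = 1 then (acc.1 ++ [line], acc.2.1, acc.2.2)
        else if flagVal f1 f2 line = 2 then (acc.1, acc.2.1 ++ [line], acc.2.2)
        else (acc.1, acc.2.1, acc.2.2 ++ [line])) := by
    funext acc line
    simp only [getD_flags]
  simp only [sorted_keys_eq, hfun, classify_fold (flagVal f1 f2)]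
  rw [sorted_filter_eq _ _ _ (PySem.Set.nodup_diff _ _ (PySem.Set.nodup_ofList f1)) (mem_bucket1 f1 f2),
      sorted_filter_eq _ _ _ (PySem.Set.nodup_diff _ _ (PySem.Set.nodup_ofList f2)) (mem_bucket2 f1 f2),
      sorted_filter_eq _ _ _ (PySem.Set.nodup_inter _ _ (PySem.Set.nodup_ofList f1)) (mem_bucket3 f1 f2)]
  simp
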